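-- pv_equiv track=rewrite | github.com/anezih/guncel-turkce-sozluk-kindle-kobo-stardict | src/gts_stardict_json.py | fix_quotes
-- ===== SOURCE A (Python) =====
-- def fix_quotes(text):
--     text = text.replace("'","’")
--     out = []
--     is_first_found = False
--     for char in text:
--         if char == '`':
--             new_char = '‘' if not is_first_found else '’ '
--             is_first_found = True
--         else:
--             new_char = char
--         out.append(new_char)
--     return ''.join(out).strip()
-- ===== SOURCE B (Python) =====
-- def fix_quotes(text):
--     text = text.replace("'", "’")
--     i = text.find('`')
--     if i != -1:
--         text = text[:i] + '‘' + text[i+1:].replace('`', '’ ')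
--     return text.strip()
-- ===== Notes on version B (the rewrite author's own statement) =====
-- stated objective: simpler
-- what changed: Replaced the stateful per-character loop with a boolean flag by a loop-free composition of string primitives: find the index of the earliest backtick, splice in the opening quote there, and replace all later backticks at once.
import Mathlib
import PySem

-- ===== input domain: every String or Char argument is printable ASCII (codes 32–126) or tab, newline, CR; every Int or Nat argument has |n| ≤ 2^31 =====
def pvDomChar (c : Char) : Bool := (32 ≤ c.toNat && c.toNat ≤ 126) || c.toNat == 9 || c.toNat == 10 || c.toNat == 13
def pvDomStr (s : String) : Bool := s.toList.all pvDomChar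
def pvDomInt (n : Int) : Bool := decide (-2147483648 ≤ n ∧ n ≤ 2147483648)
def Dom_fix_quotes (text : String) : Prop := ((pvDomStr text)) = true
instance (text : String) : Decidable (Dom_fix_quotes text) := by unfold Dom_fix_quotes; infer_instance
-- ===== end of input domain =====

-- B replaces A's per-character loop with a boolean flag by a loop-free find/slice/replace composition (objective: simpler).

-- ===== PORT A =====
-- one loop step of A: append the translated chunk for `c` to `out`, update the flag
def pvStepA (s : List (List Char) × Bool) (c : Char) : List (List Char) × Bool :=
  if c = '`' then (s.1 ++ [if s.2 then ['’', ' '] else ['‘']], true)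
  else (s.1 ++ [[c]], s.2)

def fix_quotes (text : String) : String :=
  let t := PySem.Chars.replace text.toList ['\''] ['’']
  let st := t.foldl pvStepA ([], false)
  String.ofList (PySem.Chars.strip (PySem.Chars.join [] st.1))

-- ===== PORT B =====
def fix_quotes_alt (text : String) : String :=
  let t := PySem.Chars.replace text.toList ['\''] ['’']
  let i := PySem.Chars.find t ['`']
  let t2 := if i ≠ -1 then
      PySem.Chars.slice t none (some i) ++ '‘' ::
        PySem.Chars.replace (PySem.Chars.slice t (some (i + 1)) none) ['`'] ['’', ' ']
    else t
  String.ofList (PySem.Chars.strip t2)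

-- ===== PRECONDITION & SPEC =====
def Spec_fix_quotes (text : String) (out : String) : Prop := out = fix_quotes_alt text
instance (text : String) (out : String) : Decidable (Spec_fix_quotes text out) := by unfold Spec_fix_quotes; infer_instance

-- ===== CLAIM (what is proved, stated in full; the proofs are below) =====
def Claim_equal_fix_quotes : Prop := ∀ (text : String), Dom_fix_quotes text → Spec_fix_quotes text (fix_quotes text)

-- ===== LEMMAS AND PROOFS =====

-- the per-character translation after the first backtick has been seen
def pvF (c : Char) : List Char := if c = '`' then ['’', ' '] else [c]

theorem pv_join_nil_flatten (l : List (List Char)) : PySem.Chars.join [] l = l.flatten := by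
  induction l with
  | nil => rfl
  | cons x xs ih =>
    cases xs with
    | nil => simp [PySem.Chars.join, List.intercalate]
    | cons y ys =>
      simp only [PySem.Chars.join, List.intercalate] at ih ⊢
      simp [List.intersperse, List.flatten] at ih ⊢
      exact ih

theorem pv_foldl_true (t : List Char) (out : List (List Char)) :
    t.foldl pvStepA (out, true) = (out ++ t.map pvF, true) := by
  induction t generalizing out with
  | nil => simp
  | cons c cs ih =>
    by_cases h : c = '`' <;> simp [pvStepA, pvF, h, ih]

theorem pv_foldl_false (t : List Char) (out : List (List Char)) (h : '`' ∉ t) :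
    t.foldl pvStepA (out, false) = (out ++ t.map (fun c => [c]), false) := by
  induction t generalizing out with
  | nil => simp
  | cons c cs ih =>
    simp only [List.mem_cons, not_or] at h
    simp only [List.foldl_cons, pvStepA]
    rw [if_neg (fun hc => h.1 hc.symm), ih _ h.2]
    simp

-- single-character replace is flatMap of pvF
theorem pv_replace_go (l acc : List Char) (fuel : Nat) (h : l.length ≤ fuel) :
    PySem.Chars.replace.go ['`'] ['’', ' '] fuel l acc = acc.reverse ++ l.flatMap pvF := by
  induction l generalizing acc fuel with
  | nil => cases fuel <;> simp [PySem.Chars.replace.go]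
  | cons c cs ih =>
    cases fuel with
    | zero => simp at h
    | succ n =>
      simp only [List.length_cons, Nat.succ_le_succ_iff] at h
      by_cases hc : c = '`'
      · subst hc
        simp [PySem.Chars.replace.go, List.isPrefixOf, ih _ _ h, pvF]
      · have hp : (['`'].isPrefixOf (c :: cs)) = false := by
          simp [List.isPrefixOf]; exact fun hcc => hc hcc.symm
        simp [PySem.Chars.replace.go, hp, ih _ _ h, pvF, hc]

theorem pv_replace_single (l : List Char) :
    PySem.Chars.replace l ['`'] ['’', ' '] = l.flatMap pvF := by
  simp [PySem.Chars.replace, pv_replace_go l [] l.length le_rfl]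

-- singleton infix ↔ membership
theorem pv_singleton_infix (c : Char) (l : List Char) : [c] <:+: l ↔ c ∈ l := by
  constructor
  · intro h; exact h.mem (by simp)
  · intro h
    obtain ⟨u, v, rfl⟩ := List.append_of_mem h
    exact ⟨u, v, by simp⟩

theorem pv_flatten_singleton (l : List Char) : (l.map (fun c => [c])).flatten = l := by
  induction l with
  | nil => rfl
  | cons c cs ih => simp [ih]

theorem pv_core (t : List Char) :
    PySem.Chars.join [] (t.foldl pvStepA ([], false)).1 =
      (if PySem.Chars.find t ['`'] ≠ -1 then
        PySem.Chars.slice t none (some (PySem.Chars.find t ['`'])) ++ '‘' ::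
          PySem.Chars.replace (PySem.Chars.slice t (some (PySem.Chars.find t ['`'] + 1)) none) ['`'] ['’', ' ']
      else t) := by
  by_cases hf : PySem.Chars.find t ['`'] = -1
  · have hnm : '`' ∉ t := by
      have := (PySem.Chars.find_eq_neg_one_iff t ['`']).mp hf
      exact fun hm => this ((pv_singleton_infix _ _).mpr hm)
    rw [pv_foldl_false t [] hnm]
    simp [hf, pv_join_nil_flatten, pv_flatten_singleton]
  · have h0 : 0 ≤ PySem.Chars.find t ['`'] := by
      have := PySem.Chars.neg_one_le_find t ['`']
      omega
    set i := PySem.Chars.find t ['`'] with hi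
    obtain ⟨hpre, hmin⟩ := PySem.Chars.find_spec (s := t) (sub := ['`']) h0
    set n := i.toNat with hn
    obtain ⟨v, hv⟩ := hpre
    have hsplit : t = t.take n ++ '`' :: v := by
      conv_lhs => rw [← List.take_append_drop n t]
      rw [← hv]
      simp
    have hnotu : '`' ∉ t.take n := by
      intro hm
      obtain ⟨j, hj, hjv⟩ := List.getElem_of_mem hm
      have hjn : j < n := lt_of_lt_of_le hj (by simp)
      have hjt : j < t.length := lt_of_lt_of_le hj (by simp [List.length_take])
      apply hmin j hjn
      rw [List.drop_eq_getElem_cons hjt]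
      refine ⟨t.drop (j + 1), ?_⟩
      simp [List.getElem_take] at hjv
      simp [hjv]
    have hvdrop : t.drop (n + 1) = v := by
      have : t.drop (n + 1) = (t.drop n).drop 1 := by
        rw [List.drop_drop]
      rw [this, ← hv]
      simp
    -- left side
    have hleft : (t.foldl pvStepA ([], false)).1 =
        (t.take n).map (fun c => [c]) ++ ['‘'] :: v.map pvF := by
      conv_lhs => rw [hsplit]
      rw [List.foldl_append, pv_foldl_false _ _ hnotu]
      simp only [List.foldl_cons, pvStepA]
      norm_num
      rw [pv_foldl_true]
      simp
    rw [hleft, if_pos hf, pv_join_nil_flatten]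
    -- right side slices
    have hs1 : PySem.Chars.slice t none (some i) = t.take n := by
      simp only [PySem.Chars.slice_eq_listSlice]
      rw [PySem.List.slice_to t h0]
    have hs2 : PySem.Chars.slice t (some (i + 1)) none = v := by
      simp only [PySem.Chars.slice_eq_listSlice]
      rw [PySem.List.slice_from t (by omega)]
      have : (i + 1).toNat = n + 1 := by omega
      rw [this, hvdrop]
    rw [hs1, hs2, pv_replace_single, List.flatten_append]
    simp only [List.flatten_cons, pv_flatten_singleton, List.flatMap_def, List.singleton_append]

-- ===== VERDICT (by name: the statement is the Claim_ definition above) =====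
theorem fix_quotes_spec : Claim_equal_fix_quotes := by
  intro text _
  exact congrArg (fun l => String.ofList (PySem.Chars.strip l))
    (pv_core (PySem.Chars.replace text.toList ['\''] ['’']))
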